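-- pv_equiv track=rewrite | github.com/n8mob/MAGiEpy | binary_encoding.py | judge_bits
-- ===== SOURCE A (Python) =====
-- def judge_bits(guess_bits, win_bits):
--     all_correct = True
--     judgement = ''
--     for bit_index in range(min(len(guess_bits), len(win_bits))):
--         if guess_bits[bit_index] == win_bits[bit_index]:
--             judgement += '1'
--         else:
--             judgement += '0'
--             all_correct = False
--
--     return all_correct, judgement
-- ===== SOURCE B (Python) =====
-- def judge_bits(guess_bits, win_bits):
--     n = min(len(guess_bits), len(win_bits))
--
--     def go(g, w):
--         if len(g) == 0:
--             return True, ''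
--         if len(g) == 1:
--             return (True, '1') if g == w else (False, '0')
--         m = len(g) // 2
--         ok_left, j_left = go(g[:m], w[:m])
--         ok_right, j_right = go(g[m:], w[m:])
--         return ok_left and ok_right, j_left + j_right
--
--     return go(guess_bits[:n], win_bits[:n])
-- ===== Notes on version B (the rewrite author's own statement) =====
-- stated objective: alternative
-- what changed: B judges by divide-and-conquer: it truncates both strings to the common length, splits in half, recursively judges each half, concatenates the two judgement halves and ANDs their flags, instead of A's single index loop over range(min(len,len)) threading a boolean accumulator.
import Mathlib
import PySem

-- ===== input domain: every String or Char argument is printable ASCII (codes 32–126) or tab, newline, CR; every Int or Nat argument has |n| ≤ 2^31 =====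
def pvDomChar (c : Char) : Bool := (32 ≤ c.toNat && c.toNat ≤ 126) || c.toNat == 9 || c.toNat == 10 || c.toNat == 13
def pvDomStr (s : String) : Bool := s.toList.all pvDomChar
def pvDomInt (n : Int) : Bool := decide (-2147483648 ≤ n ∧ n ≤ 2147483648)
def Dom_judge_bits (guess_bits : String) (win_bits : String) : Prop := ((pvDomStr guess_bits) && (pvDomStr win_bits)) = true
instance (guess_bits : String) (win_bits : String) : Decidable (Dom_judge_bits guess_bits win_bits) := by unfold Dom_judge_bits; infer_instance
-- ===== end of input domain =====

-- B judges by divide-and-conquer on the common prefix (split in half, recurse, concatenate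
-- judgements, AND the flags) instead of A's index loop with a threaded boolean (alternative).

-- ===== PORT A =====
-- literal port of A: loop over range(min(len,len)), indexing both strings, threading (all_correct, judgement)
def judge_bits (guess_bits : String) (win_bits : String) : Bool × String :=
  let gs := guess_bits.toList
  let ws := win_bits.toList
  let r := (PySem.List.pyRange 0 (min gs.length ws.length : Nat) 1).foldl
    (fun (s : Bool × List Char) i =>
      if PySem.List.pyGetD gs i ' ' = PySem.List.pyGetD ws i ' ' then (s.1, s.2 ++ ['1'])
      else (false, s.2 ++ ['0'])) (true, [])
  (r.1, String.ofList r.2)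

-- ===== PORT B =====
-- Source B's inner go: divide-and-conquer on lists of equal length (base cases 0 and 1, then halves)
def jbGo (g w : List Char) : Bool × List Char :=
  if g.length = 0 then (true, [])
  else if g.length = 1 then (if g = w then (true, ['1']) else (false, ['0']))
  else
    let m := g.length / 2
    let rl := jbGo (g.take m) (w.take m)
    let rr := jbGo (g.drop m) (w.drop m)
    (rl.1 && rr.1, rl.2 ++ rr.2)
termination_by g.length
decreasing_by
  · simp; omega
  · simp; omega

def judge_bits_alt (guess_bits : String) (win_bits : String) : Bool × String :=
  let gs := guess_bits.toList
  let ws := win_bits.toList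
  let n := min gs.length ws.length
  let r := jbGo (gs.take n) (ws.take n)
  (r.1, String.ofList r.2)

-- ===== PRECONDITION & SPEC =====
def Spec_judge_bits (guess_bits : String) (win_bits : String) (out : Bool × String) : Prop := out = judge_bits_alt guess_bits win_bits
instance (guess_bits : String) (win_bits : String) (out : Bool × String) : Decidable (Spec_judge_bits guess_bits win_bits out) := by unfold Spec_judge_bits; infer_instance

-- ===== CLAIM (what is proved, stated in full; the proofs are below) =====
def Claim_equal_judge_bits : Prop := ∀ (guess_bits : String) (win_bits : String), Dom_judge_bits guess_bits win_bits → Spec_judge_bits guess_bits win_bits (judge_bits guess_bits win_bits)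

-- ===== LEMMAS AND PROOFS =====

theorem zip_take_take (m : Nat) : ∀ (g w : List Char), (g.take m).zip (w.take m) = (g.zip w).take m := by
  induction m with
  | zero => simp
  | succ m ih => intro g w; cases g <;> cases w <;> simp [ih]

theorem zip_drop_drop (m : Nat) : ∀ (g w : List Char), (g.drop m).zip (w.drop m) = (g.zip w).drop m := by
  induction m with
  | zero => simp
  | succ m ih => intro g w; cases g <;> cases w <;> simp [ih]

-- characterisation of B's divide-and-conquer: map over the zip, with the flag derived from it
theorem jbGo_eq (n : Nat) : ∀ (g w : List Char), g.length = n → g.length = w.length →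
    jbGo g w = (!(((g.zip w).map (fun p => if p.1 = p.2 then '1' else '0')).contains '0'),
                (g.zip w).map (fun p => if p.1 = p.2 then '1' else '0')) := by
  induction n using Nat.strong_induction_on with
  | _ n ih =>
    intro g w hn hlen
    rw [jbGo]
    by_cases h0 : g.length = 0
    · have : g = [] := List.length_eq_zero_iff.mp h0
      simp [this]
    · simp only [h0, if_false]
      by_cases h1 : g.length = 1
      · obtain ⟨a, ha⟩ := List.length_eq_one_iff.mp h1
        obtain ⟨b, hb⟩ := List.length_eq_one_iff.mp (hlen ▸ h1)
        subst ha hb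
        simp only [h1, if_true]
        by_cases he : a = b <;> simp [he]
      · simp only [h1, if_false]
        have hg2 : 2 ≤ g.length := by omega
        set m := g.length / 2 with hm
        have hm1 : 1 ≤ m := by omega
        have hmlt : m < g.length := by omega
        have htl : (g.take m).length = m := by simp; omega
        have hdl : (g.drop m).length = g.length - m := by simp
        rw [ih m (by omega) (g.take m) (w.take m) htl (by simp; omega),
            ih (g.length - m) (by omega) (g.drop m) (w.drop m) hdl (by simp; omega)]
        rw [zip_take_take, zip_drop_drop]
        have hj := List.take_append_drop m ((g.zip w).map (fun p => if p.1 = p.2 then '1' else '0'))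
        conv_rhs => rw [← hj]
        rw [List.map_take, List.map_drop, List.contains_append]
        simp [Bool.not_or]

-- A's loop over indices < n equals prefix-of-zip processing, with the boolean as a derived flag
theorem jb_loop (gs ws : List Char) :
    ∀ (n : Nat), n ≤ (gs.zip ws).length → ∀ (b : Bool) (acc : List Char),
    (List.range n).foldl
      (fun (s : Bool × List Char) k =>
        if gs.getD k ' ' = ws.getD k ' ' then (s.1, s.2 ++ ['1']) else (false, s.2 ++ ['0']))
      (b, acc)
    = (b && !((((gs.zip ws).take n).map (fun p => if p.1 = p.2 then '1' else '0')).contains '0'),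
       acc ++ ((gs.zip ws).take n).map (fun p => if p.1 = p.2 then '1' else '0')) := by
  intro n
  induction n with
  | zero => intro _ b acc; simp
  | succ n ih =>
    intro h b acc
    have hn : n < (gs.zip ws).length := by omega
    have hg : n < gs.length := by
      have := List.length_zip (l₁ := gs) (l₂ := ws); omega
    have hw : n < ws.length := by
      have := List.length_zip (l₁ := gs) (l₂ := ws); omega
    rw [List.range_succ, List.foldl_append, ih (by omega)]
    have htake : (gs.zip ws).take (n+1) = (gs.zip ws).take n ++ [(gs.zip ws)[n]] := by
      rw [List.take_add_one]; simp [List.getElem?_eq_getElem hn]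
    simp only [List.foldl_cons, List.foldl_nil, htake, List.map_append, List.map_cons,
      List.map_nil, List.getD_eq_getElem _ _ hg, List.getD_eq_getElem _ _ hw, List.getElem_zip]
    by_cases he : gs[n] = ws[n] <;> simp [he]

-- ===== VERDICT =====
theorem judge_bits_spec : Claim_equal_judge_bits := by
  intro g w _
  unfold Spec_judge_bits judge_bits judge_bits_alt
  have hlen : min g.toList.length w.toList.length = (g.toList.zip w.toList).length := by
    simp [List.length_zip]
  have htl : (g.toList.take (min g.toList.length w.toList.length)).length
      = min g.toList.length w.toList.length := by simp
  have hwl : (w.toList.take (min g.toList.length w.toList.length)).length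
      = min g.toList.length w.toList.length := by simp
  have hz : (g.toList.take (min g.toList.length w.toList.length)).zip
        (w.toList.take (min g.toList.length w.toList.length)) = g.toList.zip w.toList := by
    rw [zip_take_take, hlen, List.take_length]
  simp only [PySem.List.pyRange_zero_nat]
  rw [List.foldl_map]
  simp only [PySem.List.pyGetD_natCast]
  rw [jbGo_eq (min g.toList.length w.toList.length) _ _ htl (htl.trans hwl.symm), hz,
      hlen, jb_loop _ _ _ (le_refl _), List.take_length]
  simp only [Bool.true_and, List.nil_append]
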